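-- pv_equiv track=rewrite | github.com/adam-does-code/MATH-4600 | tetriminoMove.py | doesClearLine
-- ===== SOURCE A (Python) =====
-- def doesClearLine(piece, board):
--     pieceIndex = []
--     for x in piece:
--         pieceIndex.append(x[1])
--     for row in board:
--         for index in row:
--             for piece in pieceIndex:
--                 if (board[0][piece] == "."):
--                     board[0][piece] = "T"
--     for row in board:
--         for index in row:
--             if index is ".":
--                 return False
--     return True
-- ===== SOURCE B (Python) =====
-- def doesClearLine(piece, board):
--     # Mark each piece column once on the top row (A repeats this for every board
--     # cell), then scan the board once for a remaining '.'.
--     # Like A, this mutates board[0] in place.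
--     if board and board[0]:
--         for _, c in piece:
--             if board[0][c] == ".":
--                 board[0][c] = "T"
--     return all(cell != "." for row in board for cell in row)
-- ===== Notes on version B (the rewrite author's own statement) =====
-- stated objective: faster
-- what changed: A re-marks the top-row piece columns once per board cell (three nested loops, rows*cols*pieces markings); B marks each piece column exactly once and then does a single scan for a remaining '.'.
import Mathlib
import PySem

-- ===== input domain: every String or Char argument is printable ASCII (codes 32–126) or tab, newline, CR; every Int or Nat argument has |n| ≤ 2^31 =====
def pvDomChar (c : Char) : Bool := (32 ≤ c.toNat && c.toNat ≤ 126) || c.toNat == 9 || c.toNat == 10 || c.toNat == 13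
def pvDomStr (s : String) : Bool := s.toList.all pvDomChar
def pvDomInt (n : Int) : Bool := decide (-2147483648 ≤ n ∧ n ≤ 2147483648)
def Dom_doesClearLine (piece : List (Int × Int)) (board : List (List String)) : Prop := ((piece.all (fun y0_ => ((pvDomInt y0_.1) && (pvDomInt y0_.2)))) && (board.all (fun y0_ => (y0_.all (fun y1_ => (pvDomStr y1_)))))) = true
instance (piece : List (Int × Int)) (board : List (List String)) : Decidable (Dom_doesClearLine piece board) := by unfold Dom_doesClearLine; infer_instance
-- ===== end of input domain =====

-- B marks each piece column on the top row once instead of once per board cell; equivalence is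
-- about the return value (both Pythons also perform the same in-place marking of board[0]).
-- Python's `index is "."` is ported as equality: CPython caches 1-char strings, so on the stated
-- ASCII domain identity with the interned literal "." coincides with string equality.

-- ===== PORT A =====
-- In A the marking loops iterate the board being mutated, but only row COUNTS matter (the body
-- ignores `row`/`index`, and the in-place marking never changes a row's length), so folding over
-- the original rows is exact.
def doesClearLine (piece : List (Int × Int)) (board : List (List String)) : Bool :=
  let pieceIndex := piece.foldl (fun acc x => acc ++ [x.2]) ([] : List Int)
  let board1 := board.foldl (fun st row =>
    row.foldl (fun st _index =>
      pieceIndex.foldl (fun st p =>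
        if PySem.List.pyGetD (PySem.List.pyGetD st 0 []) p "" == "."
        then PySem.List.pySetD st 0 (PySem.List.pySetD (PySem.List.pyGetD st 0 []) p "T")
        else st) st) st) board
  board1.all (fun row => row.all (fun index => !(index == ".")))

-- ===== PORT B =====
def doesClearLine_alt (piece : List (Int × Int)) (board : List (List String)) : Bool :=
  let board1 :=
    match board with
    | [] => []
    | r0 :: rest =>
      if r0.isEmpty then r0 :: rest
      else (piece.foldl (fun (r : List String) (x : Int × Int) =>
              if PySem.List.pyGetD r x.2 "" == "."
              then PySem.List.pySetD r x.2 "T" else r) r0) :: rest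
  (board1.flatMap (fun row => row)).all (fun cell => cell != ".")

-- ===== PRECONDITION & SPEC =====
-- Pre_ excludes exactly the inputs where A raises IndexError: a marking actually happens
-- (some board cell exists and piece is nonempty) while some piece column is out of range
-- of board's first row (Python-style, negative indices count from the end).
def Pre_doesClearLine (piece : List (Int × Int)) (board : List (List String)) : Prop :=
  piece = [] ∨ (∀ row ∈ board, row = []) ∨
    (∀ x ∈ piece, PySem.Raise.InRange (board.headD []).length x.2)
instance (piece : List (Int × Int)) (board : List (List String)) : Decidable (Pre_doesClearLine piece board) := by unfold Pre_doesClearLine; infer_instance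

def pvWitness_doesClearLine : (List (Int × Int)) × List (List String) :=
  ([(0, 0), (0, 1)], [[".", "T"], [".", "."]])

def Spec_doesClearLine (piece : List (Int × Int)) (board : List (List String)) (out : Bool) : Prop := out = doesClearLine_alt piece board
instance (piece : List (Int × Int)) (board : List (List String)) (out : Bool) : Decidable (Spec_doesClearLine piece board out) := by unfold Spec_doesClearLine; infer_instance

-- ===== CLAIM (what is proved, stated in full; the proofs are below) =====
def Claim_equal_doesClearLine : Prop := ∀ (piece : List (Int × Int)) (board : List (List String)), Dom_doesClearLine piece board → Pre_doesClearLine piece board → Spec_doesClearLine piece board (doesClearLine piece board)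

-- ===== LEMMAS AND PROOFS =====

-- the marking step of A on the whole board, and the same step on a single row
def pvStepA (st : List (List String)) (p : Int) : List (List String) :=
  if PySem.List.pyGetD (PySem.List.pyGetD st 0 []) p "" == "."
  then PySem.List.pySetD st 0 (PySem.List.pySetD (PySem.List.pyGetD st 0 []) p "T")
  else st

def pvRStep (r : List String) (p : Int) : List String :=
  if PySem.List.pyGetD r p "" == "." then PySem.List.pySetD r p "T" else r

theorem pvStepA_cons (r : List String) (rest : List (List String)) (p : Int) :
    pvStepA (r :: rest) p = pvRStep r p :: rest := by
  unfold pvStepA pvRStep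
  have h0 : PySem.List.pyGetD (r :: rest) 0 ([] : List String) = r := by
    simp [PySem.List.pyGetD, PySem.List.pyGet?, PySem.List.pyIdx?]
  have hs : ∀ v, PySem.List.pySetD (r :: rest) 0 v = v :: rest := by
    intro v; simp [PySem.List.pySetD, PySem.List.pySet?, PySem.List.pyIdx?]
  rw [h0]
  split_ifs with h
  · rw [hs]
  · rfl

theorem pvMark_cons (cols : List Int) : ∀ (r : List String) (rest : List (List String)),
    cols.foldl pvStepA (r :: rest) = cols.foldl pvRStep r :: rest := by
  induction cols with
  | nil => intro r rest; rfl
  | cons c cs ih => intro r rest; simp only [List.foldl_cons, pvStepA_cons]; exact ih _ _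

theorem pvRStep_length (r : List String) (p : Int) : (pvRStep r p).length = r.length := by
  unfold pvRStep; split_ifs <;> simp [PySem.List.length_pySetD]

theorem pvIdx_some {n : Nat} {i : Int} (h : PySem.Raise.InRange n i) :
    ∃ k, PySem.List.pyIdx? n i = some k ∧ k < n := by
  obtain ⟨h1, h2⟩ := h
  unfold PySem.List.pyIdx?
  by_cases h0 : 0 ≤ i
  · exact ⟨i.toNat, by simp [h0, h2], by omega⟩
  · refine ⟨n - (-i).toNat, by simp [h0, h1], by omega⟩

theorem pvGetD_eq {r : List String} {i : Int} {k : Nat}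
    (hk : PySem.List.pyIdx? r.length i = some k) (hlt : k < r.length) :
    PySem.List.pyGetD r i "" = r[k] := by
  simp [PySem.List.pyGetD, PySem.List.pyGet?, hk, List.getElem?_eq_getElem hlt]

theorem pvSetD_eq {r : List String} {i : Int} {k : Nat} (v : String)
    (hk : PySem.List.pyIdx? r.length i = some k) :
    PySem.List.pySetD r i v = r.set k v := by
  simp [PySem.List.pySetD, PySem.List.pySet?, hk]

-- after the step at p, cell p is not "."
theorem pvRStep_self {r : List String} {p : Int} (h : PySem.Raise.InRange r.length p) :
    PySem.List.pyGetD (pvRStep r p) p "" ≠ "." := by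
  obtain ⟨k, hk, hlt⟩ := pvIdx_some h
  unfold pvRStep
  split_ifs with hc
  · rw [pvSetD_eq "T" hk]
    have hk' : PySem.List.pyIdx? (r.set k "T").length p = some k := by
      rw [List.length_set]; exact hk
    rw [pvGetD_eq hk' (by rw [List.length_set]; exact hlt)]
    simp
  · intro hd; exact hc (by rw [hd]; rfl)

-- a cell that is not "." stays not "." under any step
theorem pvRStep_pres {r : List String} {p q : Int} {kp : Nat}
    (hkp : PySem.List.pyIdx? r.length p = some kp) (hlt : kp < r.length)
    (h : PySem.List.pyGetD r p "" ≠ ".") :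
    PySem.List.pyGetD (pvRStep r q) p "" ≠ "." := by
  unfold pvRStep
  split_ifs with hc
  · by_cases hq : PySem.Raise.InRange r.length q
    · obtain ⟨kq, hkq, hltq⟩ := pvIdx_some hq
      rw [pvSetD_eq "T" hkq]
      have hkp' : PySem.List.pyIdx? (r.set kq "T").length p = some kp := by
        rw [List.length_set]; exact hkp
      rw [pvGetD_eq hkp' (by rw [List.length_set]; exact hlt)]
      by_cases he : kq = kp
      · subst he; simp
      · rw [List.getElem_set_ne (by omega)]
        rw [pvGetD_eq hkp hlt] at h; exact h
    · -- q out of range: pySetD is the identity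
      have hnone : PySem.List.pyIdx? r.length q = none := by
        unfold PySem.Raise.InRange at hq
        rcases not_and_or.mp hq with h1 | h1 <;> push Not at h1 <;>
          unfold PySem.List.pyIdx? <;> split_ifs <;> first | rfl | omega
      simpa [PySem.List.pySetD, PySem.List.pySet?, hnone] using h
  · exact h

theorem pvFold_pres {cols : List Int} : ∀ {r : List String} {p : Int} {kp : Nat},
    PySem.List.pyIdx? r.length p = some kp → kp < r.length →
    PySem.List.pyGetD r p "" ≠ "." →
    PySem.List.pyGetD (cols.foldl pvRStep r) p "" ≠ "." := by
  induction cols with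
  | nil => intro r p kp _ _ h; exact h
  | cons c cs ih =>
    intro r p kp hkp hlt h
    rw [List.foldl_cons]
    exact ih (by rw [pvRStep_length]; exact hkp) (by rw [pvRStep_length]; exact hlt)
      (pvRStep_pres hkp hlt h)

theorem pvMarkR_marks {cols : List Int} : ∀ {r : List String},
    (∀ p ∈ cols, PySem.Raise.InRange r.length p) →
    ∀ p ∈ cols, PySem.List.pyGetD (cols.foldl pvRStep r) p "" ≠ "." := by
  induction cols with
  | nil => intro r _ p hp; cases hp
  | cons c cs ih =>
    intro r hv p hp
    rw [List.foldl_cons]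
    rcases List.mem_cons.mp hp with rfl | hp'
    · obtain ⟨k, hk, hlt⟩ := pvIdx_some (hv p List.mem_cons_self)
      have hk' : PySem.List.pyIdx? (pvRStep r p).length p = some k := by
        rw [pvRStep_length]; exact hk
      exact pvFold_pres hk' (by rw [pvRStep_length]; exact hlt)
        (pvRStep_self (hv p List.mem_cons_self))
    · exact ih (fun q hq => by rw [pvRStep_length]; exact hv q (List.mem_cons_of_mem _ hq)) p hp'

theorem pvMarkR_noop {cols : List Int} : ∀ {r : List String},
    (∀ p ∈ cols, PySem.List.pyGetD r p "" ≠ ".") → cols.foldl pvRStep r = r := by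
  induction cols with
  | nil => intro r _; rfl
  | cons c cs ih =>
    intro r h
    have hc : pvRStep r c = r := by
      unfold pvRStep
      split_ifs with hcond
      · exact absurd (by simpa using hcond) (h c List.mem_cons_self)
      · rfl
    rw [List.foldl_cons, hc]
    exact ih (fun p hp => h p (List.mem_cons_of_mem _ hp))

theorem pvMarkR_idem {cols : List Int} {r : List String}
    (hv : ∀ p ∈ cols, PySem.Raise.InRange r.length p) :
    cols.foldl pvRStep (cols.foldl pvRStep r) = cols.foldl pvRStep r :=
  pvMarkR_noop (pvMarkR_marks hv)

-- once the board is fully marked, further inner iterations do nothing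
theorem pvInner_flat {cols : List Int} {r : List String} {rest : List (List String)}
    (hv : ∀ p ∈ cols, PySem.Raise.InRange r.length p) :
    ∀ {α : Type} (l : List α),
      l.foldl (fun st _ => cols.foldl pvStepA st) (cols.foldl pvRStep r :: rest)
        = cols.foldl pvRStep r :: rest := by
  intro α l
  induction l with
  | nil => rfl
  | cons a l ih =>
    rw [List.foldl_cons, pvMark_cons, pvMarkR_idem hv]
    exact ih

theorem pvOuter_flat {cols : List Int} {r : List String} {rest : List (List String)}
    (hv : ∀ p ∈ cols, PySem.Raise.InRange r.length p) (bs : List (List String)) :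
    bs.foldl (fun st row => row.foldl (fun st _ => cols.foldl pvStepA st) st)
      (cols.foldl pvRStep r :: rest) = cols.foldl pvRStep r :: rest := by
  induction bs with
  | nil => rfl
  | cons b bs ih => rw [List.foldl_cons, pvInner_flat hv]; exact ih

-- A's whole marking phase, main case: first row nonempty, all columns in range
theorem pvA_mark {cols : List Int} {r0 : List String} {rest : List (List String)}
    (hr : r0 ≠ []) (hv : ∀ p ∈ cols, PySem.Raise.InRange r0.length p) :
    (r0 :: rest).foldl (fun st row => row.foldl (fun st _ => cols.foldl pvStepA st) st)
      (r0 :: rest) = cols.foldl pvRStep r0 :: rest := by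
  obtain ⟨c, cs, rfl⟩ := List.exists_cons_of_ne_nil hr
  rw [List.foldl_cons, List.foldl_cons, pvMark_cons, pvInner_flat hv]
  exact pvOuter_flat hv rest

theorem pvFoldl_id {α β : Type} (l : List α) (s : β) : l.foldl (fun s _ => s) s = s := by
  induction l generalizing s with
  | nil => rfl
  | cons a l ih => exact ih s

-- A's marking phase is the identity when piece is empty
theorem pvA_mark_nil (bs st : List (List String)) :
    bs.foldl (fun st row => row.foldl (fun st _ => ([] : List Int).foldl pvStepA st) st) st = st := by
  have : ∀ (row : List String) (st : List (List String)),
      row.foldl (fun st _ => ([] : List Int).foldl pvStepA st) st = st := by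
    intro row st; exact pvFoldl_id row st
  induction bs generalizing st with
  | nil => rfl
  | cons b bs ih => rw [List.foldl_cons, this]; exact ih st

-- A's marking phase is the identity when every row is empty
theorem pvA_mark_empty (cols : List Int) (bs : List (List String))
    (h : ∀ row ∈ bs, row = []) (st : List (List String)) :
    bs.foldl (fun st row => row.foldl (fun st _ => cols.foldl pvStepA st) st) st = st := by
  induction bs generalizing st with
  | nil => rfl
  | cons b bs ih =>
    rw [List.foldl_cons, h b List.mem_cons_self]
    exact ih (fun row hr => h row (List.mem_cons_of_mem _ hr)) st

-- both final scans, applied to the same marked board, agree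
theorem pvCheck_eq (bs : List (List String)) :
    bs.all (fun row => row.all (fun index => !(index == ".")))
      = (bs.flatMap (fun row => row)).all (fun cell => cell != ".") := by
  induction bs with
  | nil => rfl
  | cons b bs ih =>
    rw [List.all_cons, List.flatMap_cons, List.all_append, ih]
    rfl

-- B's marked board when the first row is nonempty
theorem pvB_main (piece : List (Int × Int)) (r0 : List String) (rest : List (List String))
    (h0 : r0 ≠ []) :
    doesClearLine_alt piece (r0 :: rest)
      = (((piece.map (·.2)).foldl pvRStep r0 :: rest).flatMap (fun row => row)).all
          (fun cell => cell != ".") := by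
  unfold doesClearLine_alt
  have he : r0.isEmpty = false := by simp [h0]
  rw [List.foldl_map]
  simp only [he, Bool.false_eq_true, if_false]
  rfl

-- B's result when it does no marking (empty board, empty first row, or empty piece)
theorem pvB_id (piece : List (Int × Int)) (board : List (List String))
    (h : board = [] ∨ (board.headD []).isEmpty = true ∨ piece = []) :
    doesClearLine_alt piece board
      = (board.flatMap (fun row => row)).all (fun cell => cell != ".") := by
  unfold doesClearLine_alt
  cases board with
  | nil => rfl
  | cons r0 rest =>
    by_cases h0 : r0.isEmpty = true
    · simp only [h0, if_true]
    · rcases h with h | h | h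
      · cases h
      · exact absurd (by simpa using h) h0
      · subst h; simp only [h0, Bool.false_eq_true, if_false, List.foldl_nil]

theorem pvA_unfold (piece : List (Int × Int)) (board : List (List String)) :
    doesClearLine piece board
      = (board.foldl (fun st row =>
          row.foldl (fun st _ => (piece.map (·.2)).foldl pvStepA st) st) board).all
          (fun row => row.all (fun index => !(index == "."))) := by
  unfold doesClearLine
  rw [PySem.List.foldl_append_singleton_eq_map]
  rfl

-- ===== VERDICT (by name: the statement is the Claim_ definition above) =====
theorem doesClearLine_spec : Claim_equal_doesClearLine := by
  intro piece board _ hpre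
  unfold Spec_doesClearLine
  rw [pvA_unfold]
  rcases hpre with rfl | hemp | hv
  · -- piece = []
    simp only [List.map_nil, pvA_mark_nil]
    rw [pvCheck_eq, pvB_id _ _ (Or.inr (Or.inr rfl))]
  · -- every row empty
    rw [pvA_mark_empty _ _ hemp, pvCheck_eq]
    cases board with
    | nil => rfl
    | cons r0 rest =>
      rw [pvB_id _ _ (Or.inr (Or.inl (by
        rw [List.headD_cons, List.isEmpty_iff]; exact hemp r0 List.mem_cons_self)))]
  · -- all piece columns in range of board's first row
    cases board with
    | nil => simp only [List.foldl_nil]; rw [pvCheck_eq, pvB_id _ _ (Or.inl rfl)]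
    | cons r0 rest =>
      by_cases hp : piece = []
      · subst hp
        simp only [List.map_nil, pvA_mark_nil]
        rw [pvCheck_eq, pvB_id _ _ (Or.inr (Or.inr rfl))]
      · -- piece nonempty forces r0 nonempty (an in-range index exists)
        obtain ⟨x, hx⟩ := List.exists_mem_of_ne_nil piece hp
        have hr0 : r0 ≠ [] := by
          intro h; rw [h] at hv
          obtain ⟨h1, h2⟩ := hv x hx
          rw [List.headD_cons] at h1 h2
          simp only [List.length_nil, Nat.cast_zero] at h1 h2
          omega
        have hv' : ∀ p ∈ piece.map (·.2), PySem.Raise.InRange r0.length p := by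
          intro p hp'
          obtain ⟨y, hy, rfl⟩ := List.mem_map.mp hp'
          simpa using hv y hy
        rw [pvA_mark hr0 hv', pvCheck_eq, pvB_main _ _ _ hr0]
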